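-- pv_equiv track=rewrite | github.com/shalini-susmita/data-structure-algorithms-problems | String/string46.py | funny
-- ===== SOURCE A (Python) =====
-- def funny(s):
-- 	a=[]
-- 	b=[]
-- 	for i in range(len(s)-1):
-- 		a.append(abs(ord(s[i])-ord(s[i+1])))
-- 	for i in range(len(s)-1,0,-1):
-- 		b.append(abs(ord(s[i])-ord(s[i-1])))
-- 	if a==b:
-- 		return 'funny'
-- 	return 'not funny'
-- ===== SOURCE B (Python) =====
-- def funny(s):
--     i, j = 0, len(s) - 1
--     while i + 1 < j:
--         if abs(ord(s[i]) - ord(s[i + 1])) != abs(ord(s[j]) - ord(s[j - 1])):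
--             return 'not funny'
--         i += 1
--         j -= 1
--     return 'funny'
-- ===== Notes on version B (the rewrite author's own statement) =====
-- stated objective: simpler
-- what changed: Instead of materialising the forward and backward difference lists and comparing them, B walks two pointers from both ends computing each difference on demand and stops at the first mismatch.
import Mathlib
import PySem

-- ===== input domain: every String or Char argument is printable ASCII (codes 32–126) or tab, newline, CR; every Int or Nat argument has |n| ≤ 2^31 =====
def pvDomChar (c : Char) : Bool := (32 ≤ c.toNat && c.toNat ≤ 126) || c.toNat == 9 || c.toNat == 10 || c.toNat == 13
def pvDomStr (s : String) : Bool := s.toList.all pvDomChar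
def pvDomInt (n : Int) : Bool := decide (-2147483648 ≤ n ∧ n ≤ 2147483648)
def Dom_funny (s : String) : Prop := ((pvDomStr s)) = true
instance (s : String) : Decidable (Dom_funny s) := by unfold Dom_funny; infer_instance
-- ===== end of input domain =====

-- B replaces A's two materialised difference lists with a two-pointer scan computing each difference on demand (simpler, O(1) extra space).

-- ===== PORT A =====
-- all range indices are in bounds, so s[i] is ported with pyGetD (the default is never read)
def funny (s : String) : String :=
  let cs := s.toList
  let n : Int := PySem.Str.len s
  let a := (PySem.List.pyRange 0 (n - 1) 1).foldl
    (fun acc i => acc ++ [|((PySem.List.pyGetD cs i ' ').toNat : Int) - ((PySem.List.pyGetD cs (i + 1) ' ').toNat : Int)|]) []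
  let b := (PySem.List.pyRange (n - 1) 0 (-1)).foldl
    (fun acc i => acc ++ [|((PySem.List.pyGetD cs i ' ').toNat : Int) - ((PySem.List.pyGetD cs (i - 1) ' ').toNat : Int)|]) []
  if a = b then "funny" else "not funny"

-- ===== PORT B =====
-- ord(s[k]) for an in-range index k
def pvOrd (cs : List Char) (k : Nat) : Int := ((cs.getD k ' ').toNat : Int)

-- the while loop of Source B: i walks up, j walks down
def funnyGo (cs : List Char) (i j : Nat) : String :=
  if _h : i + 1 < j then
    if |pvOrd cs i - pvOrd cs (i + 1)| ≠ |pvOrd cs j - pvOrd cs (j - 1)| then "not funny"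
    else funnyGo cs (i + 1) (j - 1)
  else "funny"
termination_by j - i

def funny_alt (s : String) : String := funnyGo s.toList 0 (s.toList.length - 1)

-- ===== PRECONDITION & SPEC =====
def Spec_funny (s : String) (out : String) : Prop := out = funny_alt s
instance (s : String) (out : String) : Decidable (Spec_funny s out) := by unfold Spec_funny; infer_instance

-- ===== CLAIM (what is proved, stated in full; the proofs are below) =====
def Claim_equal_funny : Prop := ∀ (s : String), Dom_funny s → Spec_funny s (funny s)

-- ===== LEMMAS AND PROOFS =====

-- the k-th adjacent difference of cs
def pvD (cs : List Char) (k : Nat) : Int := |pvOrd cs k - pvOrd cs (k + 1)|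

-- B's loop succeeds iff every difference in the window [i, j) matches its mirror
theorem funnyGo_char (cs : List Char) (i j : Nat) :
    funnyGo cs i j =
      if ∀ k, i ≤ k → k < j → pvD cs k = pvD cs (i + j - 1 - k) then "funny" else "not funny" := by
  fun_induction funnyGo cs i j with
  | case1 i j h hne =>
    rw [if_neg]
    intro hall
    have hji : j - 1 + 1 = j := by omega
    have := hall i le_rfl (by omega)
    have hidx : i + j - 1 - i = j - 1 := by omega
    rw [hidx] at this
    apply hne
    rw [show |pvOrd cs i - pvOrd cs (i + 1)| = pvD cs i from rfl, this]
    unfold pvD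
    rw [hji, abs_sub_comm]
  | case2 i j h hne ih =>
    rw [ih]
    apply if_congr _ rfl rfl
    have heq : pvD cs i = pvD cs (j - 1) := by
      have := not_not.mp hne
      unfold pvD
      rw [show j - 1 + 1 = j from by omega, abs_sub_comm (pvOrd cs (j - 1))]
      exact this
    constructor
    · intro hin k hik hkj
      rcases eq_or_lt_of_le hik with rfl | hik'
      · rw [show i + j - 1 - i = j - 1 from by omega]; exact heq
      · by_cases hkj' : k = j - 1
        · subst hkj'
          rw [show i + j - 1 - (j - 1) = i from by omega]
          exact heq.symm
        · have := hin k (by omega) (by omega)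
          rw [show i + 1 + (j - 1) - 1 - k = i + j - 1 - k from by omega] at this
          exact this
    · intro hout k hik hkj
      have := hout k (by omega) (by omega)
      rw [show i + 1 + (j - 1) - 1 - k = i + j - 1 - k from by omega]
      exact this
  | case3 i j h =>
    rw [if_pos]
    intro k h1 h2
    rw [show i + j - 1 - k = k from by omega]

-- A compares the difference list with its reversal; that holds iff every difference matches its mirror
theorem funny_char (s : String) :
    funny s =
      if ∀ k, k < s.toList.length - 1 → pvD s.toList k = pvD s.toList (s.toList.length - 2 - k)
      then "funny" else "not funny" := by
  unfold funny
  apply if_congr _ rfl rfl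
  simp only [PySem.Str.len_eq]
  set cs := s.toList with hcs
  cases h0 : cs.length with
  | zero =>
    norm_num [PySem.List.pyRange_one_eq_nil, PySem.List.pyRange_neg_one_eq_nil]
  | succ m =>
    have hcast : ((m + 1 : Nat) : Int) - 1 = (m : Int) := by push_cast; ring
    rw [hcast]
    rw [PySem.List.foldl_append_singleton_eq_map, PySem.List.foldl_append_singleton_eq_map]
    rw [PySem.List.pyRange_one, PySem.List.pyRange_neg_one]
    simp only [List.nil_append, List.map_map, Int.sub_zero, Int.toNat_natCast]
    have ha : (List.range m).map ((fun i => |((PySem.List.pyGetD cs i ' ').toNat : Int) - ((PySem.List.pyGetD cs (i + 1) ' ').toNat : Int)|) ∘ fun k => (0 : Int) + (k : Nat))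
        = (List.range m).map (pvD cs) := by
      apply List.map_congr_left
      intro k hk
      simp only [Function.comp, zero_add]
      have h1 : ((k : Int) + 1) = ((k + 1 : Nat) : Int) := by push_cast; ring
      rw [h1, PySem.List.pyGetD_natCast, PySem.List.pyGetD_natCast]
      rfl
    have hb : (List.range m).map ((fun i => |((PySem.List.pyGetD cs i ' ').toNat : Int) - ((PySem.List.pyGetD cs (i - 1) ' ').toNat : Int)|) ∘ fun k => (m : Int) - (k : Nat))
        = (List.range m).map (fun k => pvD cs (m - 1 - k)) := by
      apply List.map_congr_left
      intro k hk
      rw [List.mem_range] at hk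
      simp only [Function.comp]
      have h1 : (m : Int) - k = ((m - k : Nat) : Int) := by omega
      have h2 : ((m - k : Nat) : Int) - 1 = ((m - k - 1 : Nat) : Int) := by omega
      rw [h1, PySem.List.pyGetD_natCast, h2, PySem.List.pyGetD_natCast]
      unfold pvD pvOrd
      rw [show m - 1 - k + 1 = m - k from by omega, show m - k - 1 = m - 1 - k from by omega]
      rw [abs_sub_comm]
    rw [ha, hb]
    rw [List.map_inj_left]
    constructor
    · intro h k hk
      have := h k (by rw [List.mem_range]; omega)
      rw [this, show m + 1 - 2 - k = m - 1 - k from by omega]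
    · intro h k hk
      rw [List.mem_range] at hk
      rw [h k (by omega), show m + 1 - 2 - k = m - 1 - k from by omega]

-- ===== VERDICT (by name: the statement is the Claim_ definition above) =====
theorem funny_spec : Claim_equal_funny := by
  intro s _
  unfold Spec_funny funny_alt
  rw [funny_char, funnyGo_char]
  apply if_congr _ rfl rfl
  constructor
  · intro h k _ hk
    rw [h k hk, show s.toList.length - 2 - k = 0 + (s.toList.length - 1) - 1 - k from by omega]
  · intro h k hk
    rw [h k (Nat.zero_le k) hk,
      show 0 + (s.toList.length - 1) - 1 - k = s.toList.length - 2 - k from by omega]
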